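-- pv_equiv track=rewrite | github.com/JoSihun/ThisIsCodingTest | Part2_Chapter03/p092_3-2.py | solution
-- ===== SOURCE A (Python) =====
-- def solution(n, m, k):
--     answer = 0
--     n.sort()
--
--     cnt = 0
--     for idx in range(m):
--         if cnt < k:
--             cnt += 1
--             answer += n[-1]
--         else:
--             cnt = 0
--             answer += n[-2]
--
--     return answer
-- ===== SOURCE B (Python) =====
-- def solution(n, m, k):
--     s = sorted(n)
--     if m <= 0:
--         return 0
--     if k <= 0:
--         return m * s[-2]
--     if m <= k:
--         return m * s[-1]
--     M, S = s[-1], s[-2]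
--     full, rem = divmod(m, k + 1)
--     return full * (k * M + S) + rem * M
-- ===== Notes on version B (the rewrite author's own statement) =====
-- stated objective: alternative
-- what changed: Replaces A's m-iteration simulation loop with closed-form arithmetic: m//(k+1) full cycles of (k maxes + one second-max) plus m%(k+1) extra maxes; the O(n log n) sort dominates the measured time, so no speed is claimed.
import Mathlib
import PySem

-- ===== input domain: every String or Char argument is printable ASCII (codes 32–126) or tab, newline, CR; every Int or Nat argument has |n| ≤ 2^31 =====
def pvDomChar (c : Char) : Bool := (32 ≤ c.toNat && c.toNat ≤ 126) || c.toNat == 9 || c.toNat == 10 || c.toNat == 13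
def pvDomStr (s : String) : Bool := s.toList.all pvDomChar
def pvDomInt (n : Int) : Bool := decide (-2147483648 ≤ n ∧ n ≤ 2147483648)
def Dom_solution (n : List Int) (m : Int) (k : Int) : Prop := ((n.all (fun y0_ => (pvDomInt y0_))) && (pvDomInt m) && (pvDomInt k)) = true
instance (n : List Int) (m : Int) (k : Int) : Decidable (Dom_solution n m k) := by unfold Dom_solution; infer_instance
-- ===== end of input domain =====

-- B replaces A's m-step simulation loop by closed-form cycle arithmetic (full cycles + remainder);
-- A sorts its argument in place (a side effect B avoids): the equivalence proved is about the RETURN value only.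

-- ===== PORT A =====
def solution (n : List Int) (m : Int) (k : Int) : Int :=
  let s := PySem.List.sorted n (fun x => x) false
  ((PySem.List.pyRange 0 m 1).foldl
    (fun (st : Int × Int) _ =>
      if st.2 < k then (st.1 + (PySem.List.pyGet? s (-1)).getD 0, st.2 + 1)
      else (st.1 + (PySem.List.pyGet? s (-2)).getD 0, 0))
    (0, 0)).1

-- ===== PORT B =====
def solution_alt (n : List Int) (m : Int) (k : Int) : Int :=
  let s := PySem.List.sorted n (fun x => x) false
  if m ≤ 0 then 0
  else if k ≤ 0 then m * (PySem.List.pyGet? s (-2)).getD 0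
  else if m ≤ k then m * (PySem.List.pyGet? s (-1)).getD 0
  else
    let M := (PySem.List.pyGet? s (-1)).getD 0
    let S := (PySem.List.pyGet? s (-2)).getD 0
    let full := PySem.Int.floordiv m (k + 1)
    let rem := PySem.Int.mod m (k + 1)
    full * (k * M + S) + rem * M

-- ===== PRECONDITION & SPEC =====
-- Pre_ excludes exactly the inputs on which A raises IndexError: m ≥ 1 iterations that
-- reach n[-2] (or n[-1]) on a list that is too short.
def Pre_solution (n : List Int) (m : Int) (k : Int) : Prop :=
  m ≤ 0 ∨ 2 ≤ n.length ∨ (1 ≤ n.length ∧ m ≤ k)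
instance (n : List Int) (m : Int) (k : Int) : Decidable (Pre_solution n m k) := by
  unfold Pre_solution; infer_instance

def pvWitness_solution : List Int × Int × Int := ([3, 1, 2], 7, 2)

def Spec_solution (n : List Int) (m : Int) (k : Int) (out : Int) : Prop := out = solution_alt n m k
instance (n : List Int) (m : Int) (k : Int) (out : Int) : Decidable (Spec_solution n m k out) := by
  unfold Spec_solution; infer_instance

-- ===== CLAIM (what is proved, stated in full; the proofs are below) =====
def Claim_equal_solution : Prop := ∀ (n : List Int) (m : Int) (k : Int), Dom_solution n m k → Pre_solution n m k → Spec_solution n m k (solution n m k)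

-- ===== LEMMAS AND PROOFS =====

/-- A's loop body, as a step function on (answer, cnt). -/
def stepA (M S k : Int) (st : Int × Int) : Int × Int :=
  if st.2 < k then (st.1 + M, st.2 + 1) else (st.1 + S, 0)

/-- Folding a constant-step function over any list is iteration by its length. -/
lemma foldl_const_iterate {α β : Type} (f : α → α) (st : α) (l : List β) :
    l.foldl (fun st _ => f st) st = f^[l.length] st := by
  induction l generalizing st with
  | nil => rfl
  | cons x xs ih => simp [List.foldl, ih, Function.iterate_succ_apply]

/-- With k ≤ 0, every step adds S and keeps cnt = 0. -/
lemma iterate_stepA_nonpos (M S k : Int) (hk : k ≤ 0) (t : Nat) :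
    (stepA M S k)^[t] (0, 0) = ((t : Int) * S, 0) := by
  induction t with
  | zero => simp
  | succ t ih =>
      rw [Function.iterate_succ_apply', ih, stepA]
      have hnk : ¬ ((0 : Int) < k) := by omega
      simp only [hnk, if_false, Prod.mk.injEq]
      refine ⟨by push_cast; ring, trivial⟩

/-- With 1 ≤ k, after t steps: answer = q·(k·M+S) + r·M and cnt = r, where q = t/(k+1), r = t%(k+1). -/
lemma iterate_stepA_pos (M S k : Int) (hk : 1 ≤ k) (t : Nat) :
    (stepA M S k)^[t] (0, 0) =
      (((t : Int) / (k + 1)) * (k * M + S) + ((t : Int) % (k + 1)) * M, (t : Int) % (k + 1)) := by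
  induction t with
  | zero => simp
  | succ t ih =>
      rw [Function.iterate_succ_apply', ih, stepA]
      have hk1 : (0 : Int) < k + 1 := by omega
      have hr0 : 0 ≤ (t : Int) % (k + 1) := Int.emod_nonneg _ (by omega)
      have hrlt : (t : Int) % (k + 1) < k + 1 := Int.emod_lt_of_pos _ hk1
      have hsplit : (t : Int) = (k + 1) * ((t : Int) / (k + 1)) + (t : Int) % (k + 1) :=
        (Int.mul_ediv_add_emod _ _).symm
      by_cases hc : (t : Int) % (k + 1) < k
      · -- cnt < k : same quotient, remainder + 1
        simp only [hc, if_true]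
        have huniq := (Int.ediv_emod_unique'' (a := (t : Int) + 1) (b := k + 1)
          (r := (t : Int) % (k + 1) + 1) (q := (t : Int) / (k + 1)) (by omega)).2
          ⟨by omega, by omega, by rw [abs_of_pos hk1]; omega⟩
        push_cast
        rw [huniq.1, huniq.2]
        simp only [Prod.mk.injEq]
        refine ⟨by ring, trivial⟩
      · -- cnt = k : quotient + 1, remainder 0
        have hrk : (t : Int) % (k + 1) = k := by omega
        simp only [hc, if_false]
        have hx : (k + 1) * ((t : Int) / (k + 1) + 1) = (k + 1) * ((t : Int) / (k + 1)) + (k + 1) := by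
          ring
        have huniq := (Int.ediv_emod_unique'' (a := (t : Int) + 1) (b := k + 1)
          (r := 0) (q := (t : Int) / (k + 1) + 1) (by omega)).2
          ⟨by omega, le_refl 0, by rw [abs_of_pos hk1]; omega⟩
        push_cast
        rw [huniq.1, huniq.2, hrk]
        simp only [Prod.mk.injEq]
        refine ⟨by ring, trivial⟩

/-- Closed form of A's whole loop, for arbitrary values M (max slot) and S (second slot). -/
lemma loop_closed (M S m k : Int) :
    ((PySem.List.pyRange 0 m 1).foldl
      (fun (st : Int × Int) _ =>
        if st.2 < k then (st.1 + M, st.2 + 1) else (st.1 + S, 0)) (0, 0)).1 =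
    if m ≤ 0 then 0
    else if k ≤ 0 then m * S
    else if m ≤ k then m * M
    else (m / (k + 1)) * (k * M + S) + (m % (k + 1)) * M := by
  have hfold := foldl_const_iterate (stepA M S k) ((0 : Int), (0 : Int)) (PySem.List.pyRange 0 m 1)
  simp only [stepA] at hfold
  rw [hfold, PySem.List.length_pyRange_one]
  by_cases hm : m ≤ 0
  · have h0 : (m - 0).toNat = 0 := by omega
    rw [h0]
    simp [hm]
  · have hmlen : (((m - 0).toNat : Nat) : Int) = m := by omega
    simp only [if_neg hm]
    by_cases hk : k ≤ 0
    · rw [iterate_stepA_nonpos M S k hk, if_pos hk]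
      rw [show ((((m - 0).toNat : Nat) : Int) * S, (0 : Int)).1 = (((m - 0).toNat : Nat) : Int) * S from rfl, hmlen]
    · have hk1 : 1 ≤ k := by omega
      rw [iterate_stepA_pos M S k hk1, hmlen]
      simp only [if_neg hk]
      by_cases hmk : m ≤ k
      · have hq : m / (k + 1) = 0 := Int.ediv_eq_zero_of_lt (by omega) (by omega)
        have hr : m % (k + 1) = m := Int.emod_eq_of_lt (by omega) (by omega)
        simp [hmk, hq, hr]
      · simp [hmk]

-- ===== VERDICT (by name: the statement is the Claim_ definition above) =====
theorem solution_spec : Claim_equal_solution := by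
  intro n m k _ _
  unfold Spec_solution solution solution_alt
  rw [loop_closed]
  by_cases hm : m ≤ 0
  · simp [hm]
  · simp only [if_neg hm]
    by_cases hk : k ≤ 0
    · simp [hk]
    · simp only [if_neg hk]
      by_cases hmk : m ≤ k
      · simp [hmk]
      · simp only [if_neg hmk]
        rw [PySem.Int.floordiv_eq_ediv_of_pos (by omega), PySem.Int.mod_eq_emod_of_pos (by omega)]
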